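-- pv_equiv track=rewrite | github.com/paiml/depyler | examples/hard_generators.py | multi_stage_transform
-- ===== SOURCE A (Python) =====
-- def multi_stage_transform(nums: list[int]) -> list[int]:
--     """Three-stage pipeline: double -> filter even -> subtract one."""
--     stage1: list[int] = []
--     for x in nums:
--         stage1.append(x * 2)
--     stage2: list[int] = []
--     for x in stage1:
--         if x % 2 == 0:
--             stage2.append(x)
--     stage3: list[int] = []
--     for x in stage2:
--         stage3.append(x - 1)
--     return stage3
-- ===== SOURCE B (Python) =====
-- def multi_stage_transform(nums: list[int]) -> list[int]:
--     # Single pass: x*2 is always even, so the even-filter never removes anything;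
--     # each output element is just x*2 - 1.
--     return [x * 2 - 1 for x in nums]
-- ===== Notes on version B (the rewrite author's own statement) =====
-- stated objective: simpler
-- what changed: Collapses A's three sequential loops and two intermediate lists into a single map computing x*2-1 directly; the even-filter is dropped since x*2 is always even.
import Mathlib
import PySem

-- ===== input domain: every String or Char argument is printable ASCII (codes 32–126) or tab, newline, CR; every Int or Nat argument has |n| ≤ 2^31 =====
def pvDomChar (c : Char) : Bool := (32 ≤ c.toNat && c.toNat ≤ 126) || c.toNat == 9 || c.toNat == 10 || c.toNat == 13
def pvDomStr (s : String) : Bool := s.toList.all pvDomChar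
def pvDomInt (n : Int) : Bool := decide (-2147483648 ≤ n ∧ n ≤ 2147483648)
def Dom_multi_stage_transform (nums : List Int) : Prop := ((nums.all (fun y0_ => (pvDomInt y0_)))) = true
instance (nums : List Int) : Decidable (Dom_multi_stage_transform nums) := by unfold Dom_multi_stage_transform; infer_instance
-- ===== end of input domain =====

-- B replaces A's three staged loops (double, filter-even, subtract-one) with one direct map x ↦ x*2-1; objective: simpler.

-- ===== PORT A =====
def multi_stage_transform (nums : List Int) : List Int :=
  let stage1 := nums.foldl (fun acc x => acc ++ [x * 2]) []
  let stage2 := stage1.foldl (fun acc x => if PySem.Int.mod x 2 = 0 then acc ++ [x] else acc) []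
  stage2.foldl (fun acc x => acc ++ [x - 1]) []

-- ===== PORT B =====
def multi_stage_transform_alt (nums : List Int) : List Int :=
  nums.map (fun x => x * 2 - 1)

-- ===== PRECONDITION & SPEC =====
def Spec_multi_stage_transform (nums : List Int) (out : List Int) : Prop := out = multi_stage_transform_alt nums
instance (nums : List Int) (out : List Int) : Decidable (Spec_multi_stage_transform nums out) := by unfold Spec_multi_stage_transform; infer_instance

-- ===== CLAIM (what is proved, stated in full; the proofs are below) =====
def Claim_equal_multi_stage_transform : Prop := ∀ (nums : List Int), Dom_multi_stage_transform nums → Spec_multi_stage_transform nums (multi_stage_transform nums)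

-- ===== LEMMAS AND PROOFS =====
theorem mod_two_double (x : Int) : PySem.Int.mod (x * 2) 2 = 0 := by
  rw [PySem.Int.mod_eq_zero_iff_dvd]
  exact ⟨x, by ring⟩

-- ===== VERDICT (by name: the statement is the Claim_ definition above) =====
theorem multi_stage_transform_spec : Claim_equal_multi_stage_transform := by
  intro nums _
  show _ = _
  simp only [multi_stage_transform, multi_stage_transform_alt,
    PySem.List.foldl_append_singleton_eq_map, PySem.List.foldl_append_ite_eq_filter,
    List.nil_append, List.filter_map, List.map_map]
  rw [List.filter_eq_self.mpr]
  · simp [Function.comp]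
  · intro a _
    exact decide_eq_true (mod_two_double a)
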